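-- pv_equiv track=rewrite | github.com/cuioss/plan-marshall | marketplace/bundles/plan-marshall/skills/plan-marshall-config/scripts/_cmd_modules.py | infer_domains_from_build_systems
-- ===== SOURCE A (Python) =====
-- def infer_domains_from_build_systems(build_systems: list) -> list:
--     """Infer skill domains from build systems configuration.
--
--     Mapping:
--     - maven, gradle -> java
--     - npm -> javascript
--
--     Args:
--         build_systems: List of build system names
--
--     Returns:
--         List of inferred domain names
--     """
--     domains = []
--     for bs in build_systems:
--         bs_lower = bs.lower()
--         if bs_lower in ('maven', 'gradle') and 'java' not in domains:
--             domains.append('java')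
--         elif bs_lower == 'npm' and 'javascript' not in domains:
--             domains.append('javascript')
--     return domains
-- ===== SOURCE B (Python) =====
-- def infer_domains_from_build_systems(build_systems: list) -> list:
--     """Infer skill domains from build systems.
--
--     Different strategy from a running dedup: for each domain find the index
--     of its FIRST trigger in the input (or None), then emit the present
--     domains ordered by that first-occurrence index.
--     """
--     lows = [bs.lower() for bs in build_systems]
--     j = next((i for i, x in enumerate(lows) if x in ('maven', 'gradle')), None)
--     k = next((i for i, x in enumerate(lows) if x == 'npm'), None)
--     hits = [(i, d) for i, d in ((j, 'java'), (k, 'javascript')) if i is not None]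
--     return [d for _, d in sorted(hits)]
-- ===== Notes on version B (the rewrite author's own statement) =====
-- stated objective: alternative
-- what changed: Instead of A's single accumulating loop with membership guards, B searches for each domain's first trigger index independently (one next() per domain), then orders the present domains by those first-occurrence indices.
import Mathlib
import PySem

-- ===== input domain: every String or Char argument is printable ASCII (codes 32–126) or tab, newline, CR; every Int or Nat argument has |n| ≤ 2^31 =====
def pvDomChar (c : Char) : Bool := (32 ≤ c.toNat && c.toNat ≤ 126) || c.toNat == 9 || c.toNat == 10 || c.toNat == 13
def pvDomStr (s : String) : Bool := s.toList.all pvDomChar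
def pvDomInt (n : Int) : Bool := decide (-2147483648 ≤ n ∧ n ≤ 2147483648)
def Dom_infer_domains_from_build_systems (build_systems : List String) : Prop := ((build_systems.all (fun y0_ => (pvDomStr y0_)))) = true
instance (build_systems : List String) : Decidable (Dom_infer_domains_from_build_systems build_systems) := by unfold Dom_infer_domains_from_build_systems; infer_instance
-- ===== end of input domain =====

-- B replaces A's running dedup loop by a per-domain first-trigger-index search, emitting the
-- present domains ordered by that index; same O(n) cost, a different decomposition.

-- ===== PORT A =====
-- literal transliteration of A's single loop with inline membership guards
def infer_domains_from_build_systems (build_systems : List String) : List String :=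
  build_systems.foldl
    (fun domains bs =>
      let bs_lower := PySem.Str.lower bs
      if (bs_lower = "maven" ∨ bs_lower = "gradle") ∧ "java" ∉ domains then
        domains ++ ["java"]
      else if bs_lower = "npm" ∧ "javascript" ∉ domains then
        domains ++ ["javascript"]
      else domains)
    []

-- ===== PORT B =====
-- Source B's two next(...) generator searches: first index satisfying the predicate, or None
def pvPJ (x : String) : Bool := x == "maven" || x == "gradle"
def pvPN (x : String) : Bool := x == "npm"

-- transliteration of Source B: lowered list, first-index per domain, filter the misses,
-- sort the hits by index, project the domains. (Source B's sorted(hits) compares (int, str)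
-- tuples; sorting by the index key is exact here because when both hits are present their
-- indices differ — the two predicates are disjoint.)
def infer_domains_from_build_systems_alt (build_systems : List String) : List String :=
  let lows := build_systems.map PySem.Str.lower
  let j := lows.findIdx? pvPJ
  let k := lows.findIdx? pvPN
  let hits := ([(j, "java"), (k, "javascript")] : List (Option Nat × String)).filterMap
      (fun p => p.1.map (fun i => (i, p.2)))
  (PySem.List.sorted hits (fun p => (p.1 : Nat)) false).map Prod.snd

-- ===== PRECONDITION & SPEC =====
def Spec_infer_domains_from_build_systems (build_systems : List String) (out : List String) : Prop := out = infer_domains_from_build_systems_alt build_systems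
instance (build_systems : List String) (out : List String) : Decidable (Spec_infer_domains_from_build_systems build_systems out) := by unfold Spec_infer_domains_from_build_systems; infer_instance

-- ===== CLAIM (what is proved, stated in full; the proofs are below) =====
def Claim_equal_infer_domains_from_build_systems : Prop := ∀ (build_systems : List String), Dom_infer_domains_from_build_systems build_systems → Spec_infer_domains_from_build_systems build_systems (infer_domains_from_build_systems build_systems)

-- ===== LEMMAS AND PROOFS =====

-- A's loop on the lowered list, with the two membership tests abstracted to two Booleans
-- "may still emit java / javascript"
def pvGA : List String → Bool → Bool → List String
  | [], _, _ => []
  | x :: t, aJ, aN =>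
    if pvPJ x && aJ then "java" :: pvGA t false aN
    else if pvPN x && aN then "javascript" :: pvGA t aJ false
    else pvGA t aJ aN

-- the common closed form: output determined by the two first-trigger indices
def pvH : Option Nat → Option Nat → List String
  | none, none => []
  | some _, none => ["java"]
  | none, some _ => ["javascript"]
  | some a, some b => if a ≤ b then ["java", "javascript"] else ["javascript", "java"]

theorem pvH_map_succ (j k : Option Nat) :
    pvH (j.map (· + 1)) (k.map (· + 1)) = pvH j k := by
  cases j <;> cases k <;> simp [pvH]

theorem pvPJ_not_pvPN (x : String) (h : pvPJ x = true) : pvPN x = false := by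
  simp [pvPJ] at h
  rcases h with h | h <;> simp [pvPN, h]

-- A's fold from any accumulator = accumulator ++ pvGA with the residual permissions
theorem pv_foldA_eq (l : List String) (s : List String) :
    l.foldl
      (fun domains x =>
        if (x = "maven" ∨ x = "gradle") ∧ "java" ∉ domains then domains ++ ["java"]
        else if x = "npm" ∧ "javascript" ∉ domains then domains ++ ["javascript"]
        else domains)
      s
    = s ++ pvGA l (decide ("java" ∉ s)) (decide ("javascript" ∉ s)) := by
  induction l generalizing s with
  | nil => simp [pvGA]
  | cons x t ih =>
    rw [List.foldl_cons]
    by_cases hj : (x = "maven" ∨ x = "gradle") ∧ "java" ∉ s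
    · rw [if_pos hj, ih]
      have hx : pvPJ x = true := by rcases hj.1 with h | h <;> simp [pvPJ, h]
      simp [pvGA, hx, hj.2, pvGA]
    · rw [if_neg hj]
      by_cases hn : x = "npm" ∧ "javascript" ∉ s
      · rw [if_pos hn, ih]
        have hx : pvPN x = true := by simp [pvPN, hn.1]
        have hxj : pvPJ x = false := by simp [pvPJ, hn.1]
        simp [pvGA, hx, hxj, hn.2]
      · rw [if_neg hn, ih]
        rcases Decidable.not_and_iff_or_not.mp hj with h | h
        · have hxj : pvPJ x = false := by
            simp [pvPJ]; constructor <;> (intro hc; exact h (by simp [hc]))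
          rcases Decidable.not_and_iff_or_not.mp hn with h2 | h2
          · have hxn : pvPN x = false := by simp [pvPN]; intro hc; exact h2 hc
            simp [pvGA, hxj, hxn]
          · have hjs : "javascript" ∈ s := by
              by_contra hc; exact h2 hc
            simp [pvGA, hxj, hjs]
        · have hjava : "java" ∈ s := by by_contra hc; exact h hc
          rcases Decidable.not_and_iff_or_not.mp hn with h2 | h2
          · have hxn : pvPN x = false := by simp [pvPN]; intro hc; exact h2 hc
            simp [pvGA, hjava, hxn]
          · have hjs : "javascript" ∈ s := by by_contra hc; exact h2 hc
            simp [pvGA, hjava, hjs]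

theorem pvGA_ff (l : List String) : pvGA l false false = [] := by
  induction l with
  | nil => rfl
  | cons x t ih => simp [pvGA, ih]

theorem pvGA_tf (l : List String) : pvGA l true false = pvH (l.findIdx? pvPJ) none := by
  induction l with
  | nil => rfl
  | cons x t ih =>
    by_cases hx : pvPJ x = true
    · simp [pvGA, hx, pvGA_ff, List.findIdx?_cons, pvH]
    · simp [pvGA, hx, ih, List.findIdx?_cons]
      cases t.findIdx? pvPJ <;> simp [pvH]

theorem pvGA_ft (l : List String) : pvGA l false true = pvH none (l.findIdx? pvPN) := by
  induction l with
  | nil => rfl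
  | cons x t ih =>
    by_cases hx : pvPN x = true
    · simp [pvGA, hx, pvGA_ff, List.findIdx?_cons, pvH]
    · simp [pvGA, hx, ih, List.findIdx?_cons]
      cases t.findIdx? pvPN <;> simp [pvH]

theorem pvGA_tt (l : List String) :
    pvGA l true true = pvH (l.findIdx? pvPJ) (l.findIdx? pvPN) := by
  induction l with
  | nil => rfl
  | cons x t ih =>
    by_cases hj : pvPJ x = true
    · have hn := pvPJ_not_pvPN x hj
      rw [List.findIdx?_cons, List.findIdx?_cons]
      simp only [hj, hn, if_pos, Bool.false_eq_true, reduceIte]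
      simp [pvGA, hj, pvGA_ft]
      cases t.findIdx? pvPN <;> simp [pvH]
    · by_cases hn : pvPN x = true
      · rw [List.findIdx?_cons, List.findIdx?_cons]
        simp only [hj, hn, Bool.false_eq_true, reduceIte]
        simp [pvGA, hj, hn, pvGA_tf]
        cases t.findIdx? pvPJ <;> simp [pvH]
      · rw [List.findIdx?_cons, List.findIdx?_cons]
        simp only [hj, hn, Bool.false_eq_true, reduceIte]
        simp [pvGA, hj, hn, ih, pvH_map_succ]

-- B's sort-and-project of the ≤2 hits is the same closed form
theorem pv_alt_hits_eq_pvH (j k : Option Nat) :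
    ((PySem.List.sorted
        (([(j, "java"), (k, "javascript")] : List (Option Nat × String)).filterMap
          (fun p => p.1.map (fun i => (i, p.2))))
        (fun p => (p.1 : Nat)) false).map Prod.snd)
    = pvH j k := by
  cases j with
  | none =>
    cases k with
    | none => rfl
    | some b =>
      simp only [List.filterMap_cons, List.filterMap_nil, Option.map_some, Option.map_none]
      rw [PySem.List.sorted_eq_self_of_pairwise _ _ (by simp)]
      rfl
  | some a =>
    cases k with
    | none =>
      simp only [List.filterMap_cons, List.filterMap_nil, Option.map_some, Option.map_none]
      rw [PySem.List.sorted_eq_self_of_pairwise _ _ (by simp)]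
      rfl
    | some b =>
      simp only [List.filterMap_cons, List.filterMap_nil, Option.map_some]
      by_cases h : a ≤ b
      · rw [PySem.List.sorted_eq_self_of_pairwise _ _ (by simp [h])]
        simp [pvH, h]
      · rw [PySem.List.sorted_eq_of_perm_of_pairwise_lt _
              [((b : Nat), ("javascript" : String)), (a, "java")] _
              (List.Perm.swap _ _ _) (by rw [List.pairwise_pair]; omega)]
        simp [pvH, h]

theorem pv_alt_eq_pvH (l : List String) :
    infer_domains_from_build_systems_alt l
    = pvH ((l.map PySem.Str.lower).findIdx? pvPJ) ((l.map PySem.Str.lower).findIdx? pvPN) := by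
  simp only [infer_domains_from_build_systems_alt]
  exact pv_alt_hits_eq_pvH _ _

-- ===== VERDICT (by name: the statement is the Claim_ definition above) =====
theorem infer_domains_from_build_systems_spec : Claim_equal_infer_domains_from_build_systems := by
  intro build_systems _
  unfold Spec_infer_domains_from_build_systems infer_domains_from_build_systems
  rw [pv_alt_eq_pvH]
  rw [show (List.foldl
        (fun domains bs =>
          let bs_lower := PySem.Str.lower bs
          if (bs_lower = "maven" ∨ bs_lower = "gradle") ∧ "java" ∉ domains then domains ++ ["java"]
          else if bs_lower = "npm" ∧ "javascript" ∉ domains then domains ++ ["javascript"]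
          else domains)
        [] build_systems)
      = ((build_systems.map PySem.Str.lower).foldl
          (fun domains x =>
            if (x = "maven" ∨ x = "gradle") ∧ "java" ∉ domains then domains ++ ["java"]
            else if x = "npm" ∧ "javascript" ∉ domains then domains ++ ["javascript"]
            else domains)
          [])
    from (List.foldl_map (f := PySem.Str.lower)
        (g := fun domains x =>
          if (x = "maven" ∨ x = "gradle") ∧ "java" ∉ domains then domains ++ ["java"]
          else if x = "npm" ∧ "javascript" ∉ domains then domains ++ ["javascript"]
          else domains)).symm]
  rw [pv_foldA_eq]
  simp only [List.nil_append]
  rw [show (decide ("java" ∉ ([] : List String))) = true from rfl,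
      show (decide ("javascript" ∉ ([] : List String))) = true from rfl]
  exact pvGA_tt _
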